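-- pv_equiv track=rewrite | github.com/VishalYadav24/Beginners_Python_Assingment | Intermediate/Excercise 03/main.py | count_consecutive_duplicate
-- ===== SOURCE A (Python) =====
-- def count_consecutive_duplicate(card_no: str) -> bool:
--     """Count consecutive duplicate numbers in a string.
--
--     Arguments:
--           card_no : string of 16 digit numbers
--
--     Returns :
--           True : if number of consecutive numbers is more than allowed limit i.e 4 times
--           False : if number of consecutive numbers is less than allowed limit
--     """
--     repeating_numbers: dict = {}
--     duplicates_more_than_allowed: bool = False
--     for i in range(0, len((card_no)) - 1):
--         if card_no[i] == card_no[i + 1]: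
--             if repeating_numbers.get(card_no[i]):
--                 repeating_numbers[card_no[i]] += len(card_no[i])
--             else:
--                 repeating_numbers[card_no[i]] = len(card_no[i])
--
--     for i in repeating_numbers.values():
--         if i > 4:
--             duplicates_more_than_allowed = True
--     return duplicates_more_than_allowed
-- ===== SOURCE B (Python) =====
-- def count_consecutive_duplicate(card_no: str) -> bool:
--     """Run-based re-implementation: group the string into maximal runs of equal
--     characters; a run of length L contributes L-1 adjacent-duplicate pairs to
--     its character's total (accumulated across separate runs of the same char);
--     return True iff some character's total exceeds 4."""
--     pairs: dict = {}
--     i = 0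
--     n = len(card_no)
--     while i < n:
--         c = card_no[i]
--         j = i + 1
--         while j < n and card_no[j] == c:
--             j += 1
--         pairs[c] = pairs.get(c, 0) + (j - i - 1)
--         i = j
--     return any(v > 4 for v in pairs.values())
-- ===== Notes on version B (the rewrite author's own statement) =====
-- stated objective: alternative
-- what changed: Replaces the index-pair scan over range(len-1) plus a separate dict-truthiness update with a single run-grouping pass: each maximal run of length L adds L-1 to its character's pair total, then any(v > 4) over the totals.
import Mathlib
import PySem

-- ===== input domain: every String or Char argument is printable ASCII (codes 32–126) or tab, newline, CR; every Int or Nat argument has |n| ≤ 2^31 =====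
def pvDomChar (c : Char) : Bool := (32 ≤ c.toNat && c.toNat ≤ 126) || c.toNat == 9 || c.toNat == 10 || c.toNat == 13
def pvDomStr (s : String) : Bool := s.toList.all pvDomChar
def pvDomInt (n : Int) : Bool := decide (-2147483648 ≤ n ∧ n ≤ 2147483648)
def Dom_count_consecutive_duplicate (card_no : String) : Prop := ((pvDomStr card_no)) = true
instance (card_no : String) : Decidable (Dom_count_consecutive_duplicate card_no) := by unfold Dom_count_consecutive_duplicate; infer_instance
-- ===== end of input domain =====

-- B regroups the scan by maximal runs of equal characters (each run of length L adds L-1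
-- to its character's pair total) instead of A's index-pair loop; same results, same cost.

-- ===== PORT A =====
-- A's loop body: compare card_no[i] and card_no[i+1]; on equality, truthiness test on
-- repeating_numbers.get(c); len(card_no[i]) is always 1 (a one-character string).
def pvAStep (s : List Char) (d : PySem.Dict Char Int) (i : Int) : PySem.Dict Char Int :=
  if PySem.List.pyGetD s i ' ' == PySem.List.pyGetD s (i + 1) ' ' then
    let c := PySem.List.pyGetD s i ' '
    match d.get? c with
    | some v => if v ≠ 0 then d.insert c (v + 1) else d.insert c 1
    | none => d.insert c 1
  else d

def count_consecutive_duplicate (card_no : String) : Bool :=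
  let s := card_no.toList
  let repeating_numbers : PySem.Dict Char Int :=
    (PySem.List.pyRange 0 (PySem.Str.len card_no - 1) 1).foldl (pvAStep s) PySem.Dict.empty
  repeating_numbers.values.foldl (fun acc v => if v > 4 then true else acc) false

-- ===== PORT B =====
-- Source B's outer while loop: consume one maximal run (inner while = takeWhile/dropWhile),
-- add (run length - 1) pairs to the run character's total, continue after the run.
def pvBRuns : Nat → List Char → PySem.Dict Char Int → PySem.Dict Char Int
  | _, [], d => d
  | 0, _ :: _, d => d
  | fuel + 1, c :: rest, d =>
      pvBRuns fuel (rest.dropWhile (· == c))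
        (d.insert c (d.getD c 0 + (rest.takeWhile (· == c)).length))

def count_consecutive_duplicate_alt (card_no : String) : Bool :=
  (pvBRuns card_no.toList.length card_no.toList PySem.Dict.empty).values.any
    (fun v => decide (v > 4))

-- ===== PRECONDITION & SPEC =====
def Spec_count_consecutive_duplicate (card_no : String) (out : Bool) : Prop := out = count_consecutive_duplicate_alt card_no
instance (card_no : String) (out : Bool) : Decidable (Spec_count_consecutive_duplicate card_no out) := by unfold Spec_count_consecutive_duplicate; infer_instance

-- ===== CLAIM (what is proved, stated in full; the proofs are below) =====
def Claim_equal_count_consecutive_duplicate : Prop := ∀ (card_no : String), Dom_count_consecutive_duplicate card_no → Spec_count_consecutive_duplicate card_no (count_consecutive_duplicate card_no)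

-- ===== LEMMAS AND PROOFS =====

-- number of adjacent equal pairs of character c in l
def pvPc (l : List Char) (c : Char) : Nat :=
  (l.zip l.tail).countP (fun p => p.1 == p.2 && p.1 == c)

theorem pvPc_cons_cons (a b : Char) (t : List Char) (c : Char) :
    pvPc (a :: b :: t) c = (if a = b ∧ a = c then 1 else 0) + pvPc (b :: t) c := by
  simp [pvPc, List.countP_cons]
  by_cases h1 : a = b <;> by_cases h2 : a = c <;> simp [h1, h2] <;> omega

theorem pvPc_mem {l : List Char} {c : Char} (h : pvPc l c ≠ 0) : c ∈ l := by
  have : ∃ p ∈ l.zip l.tail, (p.1 == p.2 && p.1 == c) = true := by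
    by_contra hc
    push Not at hc
    exact h (List.countP_eq_zero.mpr (by intro p hp; simpa using hc p hp))
  obtain ⟨p, hp, hb⟩ := this
  simp only [Bool.and_eq_true, beq_iff_eq] at hb
  have := List.of_mem_zip hp
  rw [← hb.2]; exact this.1

-- run decomposition of pvPc
theorem pvPc_run (c0 : Char) (rest : List Char) (c : Char) :
    pvPc (c0 :: rest) c =
      (if c = c0 then (rest.takeWhile (· == c0)).length else 0)
        + pvPc (rest.dropWhile (· == c0)) c := by
  induction rest generalizing c0 with
  | nil => simp [pvPc]
  | cons r rs ih =>
    by_cases hr : r = c0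
    · subst hr
      rw [pvPc_cons_cons]
      simp only [List.takeWhile_cons, List.dropWhile_cons, BEq.rfl]
      rw [ih r]
      by_cases hc : c = r
      · simp [hc]; omega
      · have h1 : ¬ (r = r ∧ r = c) := fun hx => hc hx.2.symm
        have h2 : ¬ r = c := fun hx => hc hx.symm
        simp [hc, h1, h2]
    · rw [pvPc_cons_cons]
      have hb : (r == c0) = false := by simp [hr]
      simp only [List.takeWhile_cons, List.dropWhile_cons, hb]
      have h2 : ¬ (c0 = r ∧ c0 = c) := fun hx => hr hx.1.symm
      simp [h2]

-- ===== A side =====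

-- A's fold over indices equals a fold over the list of adjacent pairs
theorem pvA_fold_pairs (s : List Char) :
    ∀ (d0 : PySem.Dict Char Int),
      (List.range (s.length - 1)).foldl
          (fun d (k : Nat) => pvAStep s d (k : Int)) d0
        = (s.zip s.tail).foldl
            (fun d p =>
              if p.1 == p.2 then
                match d.get? p.1 with
                | some v => if v ≠ 0 then d.insert p.1 (v + 1) else d.insert p.1 1
                | none => d.insert p.1 1
              else d) d0 := by
  induction s with
  | nil => intro d0; simp
  | cons a t ih =>
    intro d0
    cases t with
    | nil => simp
    | cons b u =>
      have hlen : (a :: b :: u).length - 1 = (b :: u).length - 1 + 1 := by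
        simp
      rw [hlen, List.range_succ_eq_map, List.foldl_cons, List.foldl_map]
      have e1 : ∀ (t : List Char) (x : Char) (m : Nat),
          PySem.List.pyGetD (x :: t) ((m + 1 : Nat) : Int) ' ' = PySem.List.pyGetD t ((m : Nat) : Int) ' ' := by
        intro t x m
        rw [PySem.List.pyGetD_natCast, PySem.List.pyGetD_natCast]
        simp
      have hstep : ∀ (d : PySem.Dict Char Int) (k : Nat),
          pvAStep (a :: b :: u) d ((k.succ : Nat) : Int) = pvAStep (b :: u) d (k : Int) := by
        intro d k
        show pvAStep (a :: b :: u) d (((k + 1 : Nat)) : Int) = pvAStep (b :: u) d ((k : Nat) : Int)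
        unfold pvAStep
        rw [show (((k + 1 : Nat) : Int) + 1) = ((k + 1 + 1 : Nat) : Int) by push_cast; ring,
            show (((k : Nat) : Int) + 1) = ((k + 1 : Nat) : Int) by push_cast; ring,
            e1 (b :: u) a k, e1 (b :: u) a (k + 1), e1 u b k]
      have hfirst : pvAStep (a :: b :: u) d0 ((0 : Nat) : Int)
          = (if a == b then
              match d0.get? a with
              | some v => if v ≠ 0 then d0.insert a (v + 1) else d0.insert a 1
              | none => d0.insert a 1
            else d0) := by
        unfold pvAStep
        rw [show (((0 : Nat) : Int) + 1) = ((1 : Nat) : Int) by norm_num,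
            PySem.List.pyGetD_natCast, PySem.List.pyGetD_natCast]
        simp
      rw [PySem.List.foldl_congr_mem _ _ _ _ (fun d k _ => hstep d k), ih, hfirst]
      simp

-- invariant of the pair fold: get? c reports the accumulated pair count (none if zero)
theorem pvA_inv (ps : List (Char × Char)) :
    ∀ (f : Char → Nat) (d : PySem.Dict Char Int),
      (∀ c, d.get? c = if f c = 0 then none else some ((f c : Nat) : Int)) →
      d.keys.Nodup →
      (∀ c, (ps.foldl
          (fun d p =>
            if p.1 == p.2 then
              match d.get? p.1 with
              | some v => if v ≠ 0 then d.insert p.1 (v + 1) else d.insert p.1 1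
              | none => d.insert p.1 1
            else d) d).get? c
        = if f c + ps.countP (fun p => p.1 == p.2 && p.1 == c) = 0 then none
          else some ((f c + ps.countP (fun p => p.1 == p.2 && p.1 == c) : Nat) : Int))
      ∧ (ps.foldl
          (fun d p =>
            if p.1 == p.2 then
              match d.get? p.1 with
              | some v => if v ≠ 0 then d.insert p.1 (v + 1) else d.insert p.1 1
              | none => d.insert p.1 1
            else d) d).keys.Nodup := by
  induction ps with
  | nil => intro f d hd hnd; simpa using ⟨hd, hnd⟩
  | cons p ps ih =>
    intro f d hd hnd
    by_cases hpq : p.1 = p.2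
    · have hb : (p.1 == p.2) = true := by simp [hpq]
      have hd' : (d.insert p.1 ((f p.1 : Int) + 1)).get? =
          fun c => if (fun c => if c = p.1 then f c + 1 else f c) c = 0 then none
            else some (((fun c => if c = p.1 then f c + 1 else f c) c : Nat) : Int) := by
        funext c
        rw [PySem.Dict.get?_insert]
        by_cases hc : c = p.1
        · subst hc; simp
        · simp [hc, hd c]
      have hstep : (if p.1 == p.2 then
            match d.get? p.1 with
            | some v => if v ≠ 0 then d.insert p.1 (v + 1) else d.insert p.1 1
            | none => d.insert p.1 1
          else d) = d.insert p.1 ((f p.1 : Int) + 1) := by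
        rw [if_pos hb, hd p.1]
        by_cases hz : f p.1 = 0
        · simp [hz]
        · have : ((f p.1 : Nat) : Int) ≠ 0 := by exact_mod_cast hz
          simp [hz, this]
      have hnd' : (d.insert p.1 ((f p.1 : Int) + 1)).keys.Nodup :=
        PySem.Dict.nodup_keys_insert _ _ _ hnd
      have := ih (fun c => if c = p.1 then f c + 1 else f c)
        (d.insert p.1 ((f p.1 : Int) + 1)) (fun c => congrFun hd' c) hnd'
      refine ⟨?_, ?_⟩
      · intro c
        rw [List.foldl_cons, hstep]
        rw [(this.1 c)]
        have harith : (if c = p.1 then f c + 1 else f c)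
              + ps.countP (fun q => q.1 == q.2 && q.1 == c)
            = f c + (p :: ps).countP (fun q => q.1 == q.2 && q.1 == c) := by
          rw [List.countP_cons]
          by_cases hc : c = p.1
          · subst hc
            simp [hpq]
            omega
          · have hne : p.1 ≠ c := fun h => hc h.symm
            simp [hc, hne]
        rw [harith]
      · rw [List.foldl_cons, hstep]; exact this.2
    · have hb : (p.1 == p.2) = false := by simp [hpq]
      have := ih f d hd hnd
      refine ⟨?_, ?_⟩
      · intro c
        rw [List.foldl_cons, if_neg (by simp [hb])]
        rw [this.1 c, List.countP_cons]
        have : (p.1 == p.2 && p.1 == c) = false := by simp [hpq]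
        simp [this]
      · rw [List.foldl_cons, if_neg (by simp [hb])]; exact this.2

-- ===== B side =====

theorem pvB_getD (fuel : Nat) :
    ∀ (l : List Char) (d : PySem.Dict Char Int), l.length ≤ fuel →
      ∀ (c : Char), (pvBRuns fuel l d).getD c 0 = d.getD c 0 + (pvPc l c : Int) := by
  induction fuel with
  | zero =>
    intro l d hl c
    have : l = [] := List.eq_nil_of_length_eq_zero (Nat.le_zero.mp hl)
    subst this
    simp [pvBRuns, pvPc]
  | succ n ih =>
    intro l d hl c
    cases l with
    | nil => simp [pvBRuns, pvPc]
    | cons c0 rest =>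
      have hfl : (rest.dropWhile (· == c0)).length ≤ n := by
        have h1 := List.length_dropWhile_le (· == c0) rest
        simp at hl
        omega
      rw [pvBRuns, ih _ _ hfl c]
      rw [PySem.Dict.getD_insert]
      rw [pvPc_run c0 rest c]
      by_cases hc : c = c0
      · subst hc; simp; push_cast; ring
      · simp [hc]

theorem pvB_keys (fuel : Nat) :
    ∀ (l : List Char) (d : PySem.Dict Char Int), l.length ≤ fuel →
      ∀ (c : Char), (c ∈ (pvBRuns fuel l d).keys ↔ c ∈ d.keys ∨ c ∈ l) := by
  induction fuel with
  | zero =>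
    intro l d hl c
    have : l = [] := List.eq_nil_of_length_eq_zero (Nat.le_zero.mp hl)
    subst this
    simp [pvBRuns]
  | succ n ih =>
    intro l d hl c
    cases l with
    | nil => simp [pvBRuns]
    | cons c0 rest =>
      have hfl : (rest.dropWhile (· == c0)).length ≤ n := by
        have h1 := List.length_dropWhile_le (· == c0) rest
        simp at hl
        omega
      rw [pvBRuns, ih _ _ hfl c]
      rw [PySem.Dict.mem_keys_insert]
      constructor
      · rintro (⟨h | h⟩ | h)
        · exact Or.inr (by simp [h])
        · exact Or.inl h
        · refine Or.inr (List.mem_cons_of_mem _ ?_)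
          have hsplit := List.takeWhile_append_dropWhile (p := (· == c0)) (l := rest)
          rw [← hsplit]
          exact List.mem_append_right _ h
      · rintro (h | h)
        · exact Or.inl (Or.inr h)
        · rcases List.mem_cons.mp h with h | h
          · exact Or.inl (Or.inl h)
          · have hsplit := List.takeWhile_append_dropWhile (p := (· == c0)) (l := rest)
            rw [← hsplit] at h
            rcases List.mem_append.mp h with h | h
            · have := List.mem_takeWhile_imp h
              exact Or.inl (Or.inl (by simpa using this))
            · exact Or.inr h

theorem pvB_nodup (fuel : Nat) :
    ∀ (l : List Char) (d : PySem.Dict Char Int), d.keys.Nodup → (pvBRuns fuel l d).keys.Nodup := by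
  induction fuel with
  | zero =>
    intro l d h
    cases l <;> simpa [pvBRuns] using h
  | succ n ih =>
    intro l d h
    cases l with
    | nil => simpa [pvBRuns] using h
    | cons c0 rest =>
      rw [pvBRuns]
      exact ih _ _ (PySem.Dict.nodup_keys_insert _ _ _ h)

-- ===== assembly =====

theorem pvFoldOr (l : List Int) : ∀ b : Bool,
    List.foldl (fun acc v => if v > 4 then true else acc) b l
      = (b || l.any (fun v => decide (v > 4))) := by
  induction l with
  | nil => intro b; simp
  | cons x xs ih =>
    intro b
    rw [List.foldl_cons]
    by_cases h : (4 : Int) < x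
    · rw [if_pos h, ih true]
      simp [h]
    · rw [if_neg h, ih b]
      simp [h]

theorem pvAuxA (s : List Char) (d : PySem.Dict Char Int) (g : Char → Nat)
    (hget : ∀ c, d.get? c = if g c = 0 then none else some ((g c : Nat) : Int))
    (hnd : d.keys.Nodup)
    (hmem : ∀ c, g c ≠ 0 → c ∈ s) :
    d.values.any (fun v => decide (v > 4)) = decide (∃ c ∈ s, 4 < g c) := by
  rw [PySem.Dict.values_eq_map_keys d hnd 0, List.any_map, Bool.eq_iff_iff]
  simp only [List.any_eq_true, Function.comp, decide_eq_true_eq]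
  constructor
  · rintro ⟨c, hck, hcv⟩
    have hgd : d.getD c 0 = if g c = 0 then 0 else ((g c : Nat) : Int) := by
      rw [PySem.Dict.getD_eq_get?_getD, hget c]
      by_cases h : g c = 0 <;> simp [h]
    rw [hgd] at hcv
    by_cases h : g c = 0
    · rw [if_pos h] at hcv; omega
    · rw [if_neg h] at hcv
      exact ⟨c, hmem c h, by exact_mod_cast hcv⟩
  · rintro ⟨c, _, h5⟩
    have hne : g c ≠ 0 := by omega
    have hck : c ∈ d.keys := by
      by_contra hnk
      have h0 := (PySem.Dict.get?_eq_none_iff_not_mem_keys (d := d) (k := c)).mpr hnk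
      rw [hget c, if_neg hne] at h0
      exact Option.some_ne_none _ h0
    refine ⟨c, hck, ?_⟩
    have hgd : d.getD c 0 = ((g c : Nat) : Int) := by
      rw [PySem.Dict.getD_eq_get?_getD, hget c, if_neg hne]; rfl
    rw [hgd]; exact_mod_cast h5

theorem pvAuxB (s : List Char) (d : PySem.Dict Char Int) (g : Char → Nat)
    (hgd : ∀ c, d.getD c 0 = ((g c : Nat) : Int))
    (hnd : d.keys.Nodup)
    (hk : ∀ c, c ∈ d.keys ↔ c ∈ s) :
    d.values.any (fun v => decide (v > 4)) = decide (∃ c ∈ s, 4 < g c) := by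
  rw [PySem.Dict.values_eq_map_keys d hnd 0, List.any_map, Bool.eq_iff_iff]
  simp only [List.any_eq_true, Function.comp, decide_eq_true_eq]
  constructor
  · rintro ⟨c, hck, hcv⟩
    rw [hgd c] at hcv
    exact ⟨c, (hk c).mp hck, by exact_mod_cast hcv⟩
  · rintro ⟨c, hcm, h5⟩
    exact ⟨c, (hk c).mpr hcm, by rw [hgd c]; exact_mod_cast h5⟩

theorem pvA_char (s : List Char) :
    count_consecutive_duplicate (String.ofList s)
      = decide (∃ c ∈ s, 4 < pvPc s c) := by
  unfold count_consecutive_duplicate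
  have hlen : PySem.Str.len (String.ofList s) = (s.length : Int) := by
    simp [PySem.Str.len, PySem.Chars.len]
  have hrange : PySem.List.pyRange 0 ((s.length : Int) - 1) 1
      = (List.range (s.length - 1)).map (fun k : Nat => (0 : Int) + (k : Int)) := by
    rw [PySem.List.pyRange_one,
        show ((s.length : Int) - 1 - 0).toNat = s.length - 1 from by omega]
  rw [hlen, String.toList_ofList, hrange]
  simp only [List.foldl_map]
  have hbody : ∀ (d : PySem.Dict Char Int) (k : Nat),
      pvAStep s d ((0 : Int) + (k : Int)) = pvAStep s d ((k : Nat) : Int) := by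
    intro d k; rw [zero_add]
  rw [PySem.List.foldl_congr_mem _ _ _ _ (fun d k _ => hbody d k),
      pvA_fold_pairs s PySem.Dict.empty, pvFoldOr, Bool.false_or]
  have hinv := pvA_inv (s.zip s.tail) (fun _ => 0) PySem.Dict.empty
    (by intro c; simp [PySem.Dict.get?_empty]) (by simp [PySem.Dict.keys_empty])
  exact pvAuxA s _ (pvPc s)
    (fun c => by simpa [pvPc] using hinv.1 c)
    hinv.2
    (fun c h => pvPc_mem h)

theorem pvB_char (s : List Char) :
    count_consecutive_duplicate_alt (String.ofList s)
      = decide (∃ c ∈ s, 4 < pvPc s c) := by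
  unfold count_consecutive_duplicate_alt
  rw [String.toList_ofList]
  refine pvAuxB s _ (pvPc s) ?_ ?_ ?_
  · intro c
    rw [pvB_getD s.length s PySem.Dict.empty (le_refl _) c]
    simp [PySem.Dict.getD_empty]
  · exact pvB_nodup s.length s _ (by simp [PySem.Dict.keys_empty])
  · intro c
    rw [pvB_keys s.length s PySem.Dict.empty (le_refl _) c]
    simp [PySem.Dict.keys_empty]

-- ===== VERDICT (by name: the statement is the Claim_ definition above) =====
theorem count_consecutive_duplicate_spec : Claim_equal_count_consecutive_duplicate := by
  intro card_no _
  unfold Spec_count_consecutive_duplicate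
  have h : card_no = String.ofList card_no.toList := String.ofList_toList.symm
  rw [h, pvA_char card_no.toList, pvB_char card_no.toList]
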